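-- pv_equiv track=rewrite | github.com/durgapuri/Wikipedia-Search-Engine | Phase1/wiki_indexer.py | createPageDict
-- ===== SOURCE A (Python) =====
-- def createPageDict(title, infobox, body, category, link, references):
--     pagedict = dict()
--
--     # list format title, infobox, body, category, link, references
--     # create local dictionary pagedict for entire page.. keep updating counts
--     li = [0, 0, 0 ,0, 0 ,0]
--     for i in title.keys():
--         if i not in pagedict:
--             pagedict[i]=[0, 0, 0 ,0, 0 ,0]
--         pagedict[i][0]+=title[i]
--
--     for i in infobox.keys():
--         if i not in pagedict:
--             pagedict[i]=[0, 0, 0 ,0, 0 ,0]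
--         pagedict[i][1]+=infobox[i]
--
--     for i in body.keys():
--         if i not in pagedict:
--             pagedict[i]=[0, 0, 0 ,0, 0 ,0]
--         pagedict[i][2]+=body[i]
--
--     for i in category.keys():
--         if i not in pagedict:
--             pagedict[i]=[0, 0, 0 ,0, 0 ,0]
--         pagedict[i][3]+=category[i]
--
--     for i in link.keys():
--         if i not in pagedict:
--             pagedict[i]=[0, 0, 0 ,0, 0 ,0]
--         pagedict[i][4]+=link[i]
--
--     for i in references.keys():
--         if i not in pagedict:
--             pagedict[i]=[0, 0, 0 ,0, 0 ,0]
--         pagedict[i][5]+=references[i]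
--
--     return pagedict
-- ===== SOURCE B (Python) =====
-- def createPageDict(title, infobox, body, category, link, references):
--     # pull-style: union of keys first, then build each six-slot vector in one go
--     fields = (title, infobox, body, category, link, references)
--     keys = dict.fromkeys(k for d in fields for k in d)
--     return {k: [d.get(k, 0) for d in fields] for k in keys}
-- ===== Notes on version B (the rewrite author's own statement) =====
-- stated objective: simpler
-- what changed: A pushes per-field counts in six passes, each creating a zero vector and patching one slot in place; B first takes the ordered union of the six key sets and then builds each complete six-slot vector in a single pull pass with d.get(k, 0).
import Mathlib
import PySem

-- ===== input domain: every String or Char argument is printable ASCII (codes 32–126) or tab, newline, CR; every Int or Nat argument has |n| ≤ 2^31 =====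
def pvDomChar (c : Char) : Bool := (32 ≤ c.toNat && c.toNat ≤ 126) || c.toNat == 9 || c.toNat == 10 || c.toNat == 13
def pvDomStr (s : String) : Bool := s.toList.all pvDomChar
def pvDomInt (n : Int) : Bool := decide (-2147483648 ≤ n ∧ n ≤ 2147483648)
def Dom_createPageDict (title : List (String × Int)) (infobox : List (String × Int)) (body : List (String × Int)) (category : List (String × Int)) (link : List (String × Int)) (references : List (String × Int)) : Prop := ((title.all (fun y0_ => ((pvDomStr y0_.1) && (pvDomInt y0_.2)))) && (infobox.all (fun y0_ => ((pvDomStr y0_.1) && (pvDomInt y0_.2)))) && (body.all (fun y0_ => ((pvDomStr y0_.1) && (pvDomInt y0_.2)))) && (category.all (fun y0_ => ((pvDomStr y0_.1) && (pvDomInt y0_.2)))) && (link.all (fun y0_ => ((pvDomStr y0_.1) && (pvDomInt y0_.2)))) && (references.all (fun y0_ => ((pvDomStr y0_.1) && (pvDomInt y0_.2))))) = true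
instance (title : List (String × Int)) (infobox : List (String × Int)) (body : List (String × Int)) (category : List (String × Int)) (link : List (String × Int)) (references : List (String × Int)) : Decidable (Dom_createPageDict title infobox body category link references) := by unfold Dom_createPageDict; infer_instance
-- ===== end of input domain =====

-- B replaces A's six push-passes (each patching one slot of a zero vector) by one pull pass over the
-- key union that builds each six-slot vector directly; objective: simpler (same asymptotic cost).


-- Shared dict primitives for the dict-typed arguments (assoc lists, first-match lookup):
-- pvKeys d = d.keys() (a dict's keys are its distinct keys, in order); pvGet d k = d[k] / d.get(k, 0).
def pvKeys (d : List (String × Int)) : List String := PySem.List.dedup (d.map Prod.fst)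
def pvGet (d : List (String × Int)) (k : String) : Int := (d.lookup k).getD 0

-- ===== PORT A =====
-- A's six identical loops share one body: 'if i not in pagedict: pagedict[i]=[0,0,0,0,0,0]; pagedict[i][j] += field[i]'
def pvBodyA (field : List (String × Int)) (j : Int) (pd : PySem.Dict String (List Int)) (i : String) : PySem.Dict String (List Int) :=
  let pd' := if pd.contains i then pd else pd.insert i [0, 0, 0, 0, 0, 0]
  pd'.modify i [] (fun v => PySem.List.pySetD v j (PySem.List.pyGetD v j 0 + pvGet field i))

-- 'for i in field.keys(): <body>'
def pvLoopA (field : List (String × Int)) (j : Int) (pd : PySem.Dict String (List Int)) : PySem.Dict String (List Int) :=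
  (pvKeys field).foldl (pvBodyA field j) pd

def createPageDict (title : List (String × Int)) (infobox : List (String × Int)) (body : List (String × Int)) (category : List (String × Int)) (link : List (String × Int)) (references : List (String × Int)) : List (String × List Int) :=
  let pagedict : PySem.Dict String (List Int) := PySem.Dict.empty
  let pagedict := pvLoopA title 0 pagedict
  let pagedict := pvLoopA infobox 1 pagedict
  let pagedict := pvLoopA body 2 pagedict
  let pagedict := pvLoopA category 3 pagedict
  let pagedict := pvLoopA link 4 pagedict
  let pagedict := pvLoopA references 5 pagedict
  pagedict.items

-- ===== PORT B =====
def createPageDict_alt (title : List (String × Int)) (infobox : List (String × Int)) (body : List (String × Int)) (category : List (String × Int)) (link : List (String × Int)) (references : List (String × Int)) : List (String × List Int) :=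
  let fields := [title, infobox, body, category, link, references]
  let keys := PySem.List.dedup (fields.flatMap pvKeys)
  keys.map (fun k => (k, fields.map (fun d => pvGet d k)))

-- ===== PRECONDITION & SPEC =====
def Spec_createPageDict (title : List (String × Int)) (infobox : List (String × Int)) (body : List (String × Int)) (category : List (String × Int)) (link : List (String × Int)) (references : List (String × Int)) (out : List (String × List Int)) : Prop := out = createPageDict_alt title infobox body category link references
instance (title : List (String × Int)) (infobox : List (String × Int)) (body : List (String × Int)) (category : List (String × Int)) (link : List (String × Int)) (references : List (String × Int)) (out : List (String × List Int)) : Decidable (Spec_createPageDict title infobox body category link references out) := by unfold Spec_createPageDict; infer_instance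

-- ===== CLAIM (what is proved, stated in full; the proofs are below) =====
def Claim_equal_createPageDict : Prop := ∀ (title : List (String × Int)) (infobox : List (String × Int)) (body : List (String × Int)) (category : List (String × Int)) (link : List (String × Int)) (references : List (String × Int)), Dom_createPageDict title infobox body category link references → Spec_createPageDict title infobox body category link references (createPageDict title infobox body category link references)

-- ===== LEMMAS AND PROOFS =====

-- d.get(k, 0) on a key not in the dict is 0
theorem lookup_none_of_not_mem_fst (d : List (String × Int)) (k : String) (h : k ∉ d.map Prod.fst) : d.lookup k = none := by
  induction d with
  | nil => rfl
  | cons p t ih =>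
    simp only [List.map_cons, List.mem_cons, not_or] at h
    simp [List.lookup, ih h.2, beq_eq_false_iff_ne.mpr h.1]

theorem pvGet_eq_zero (d : List (String × Int)) (k : String) (h : k ∉ pvKeys d) : pvGet d k = 0 := by
  have h' : k ∉ d.map Prod.fst := by
    simpa [pvKeys, PySem.List.mem_dedup] using h
  simp [pvGet, lookup_none_of_not_mem_fst d k h']

-- the pending vector A's body updates at key k: the stored one if present, else fresh zeros
def pvV (pd : PySem.Dict String (List Int)) (k : String) : List Int :=
  if pd.contains k then pd.getD k [] else [0, 0, 0, 0, 0, 0]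

theorem bodyA_keys (f : List (String × Int)) (j : Int) (pd : PySem.Dict String (List Int)) (i : String) :
    (pvBodyA f j pd i).keys = PySem.Set.add pd.keys i := by
  cases hc : pd.contains i with
  | true =>
    have hm : i ∈ pd.keys := (PySem.Dict.contains_iff_mem_keys pd i).mp hc
    simp only [pvBodyA, hc, if_true]
    rw [PySem.Dict.keys_modify, PySem.Dict.keys_insert_of_contains _ _ hc, PySem.Set.add_of_mem hm]
  | false =>
    have hm : i ∉ pd.keys := fun h => by simp [(PySem.Dict.contains_iff_mem_keys pd i).mpr h] at hc
    simp only [pvBodyA, hc, Bool.false_eq_true, if_false]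
    rw [PySem.Dict.keys_modify, PySem.Dict.keys_insert_of_contains,
        PySem.Dict.keys_insert_of_not_contains _ _ hc, PySem.Set.add_of_not_mem hm]
    simp [PySem.Dict.contains_insert_self]

theorem bodyA_contains (f : List (String × Int)) (j : Int) (pd : PySem.Dict String (List Int)) (i k : String) :
    (pvBodyA f j pd i).contains k = (k == i || pd.contains k) := by
  cases hc : pd.contains i with
  | true =>
    simp only [pvBodyA, hc, if_true]
    rw [PySem.Dict.contains_modify]
  | false =>
    simp only [pvBodyA, hc, Bool.false_eq_true, if_false]
    rw [PySem.Dict.contains_modify]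
    simp [PySem.Dict.contains_insert]

theorem bodyA_getD_self (f : List (String × Int)) (j : Int) (pd : PySem.Dict String (List Int)) (i : String) :
    (pvBodyA f j pd i).getD i [] =
      PySem.List.pySetD (pvV pd i) j (PySem.List.pyGetD (pvV pd i) j 0 + pvGet f i) := by
  cases hc : pd.contains i with
  | true =>
    simp only [pvBodyA, pvV, hc, if_true]
    rw [PySem.Dict.getD_modify_self]
  | false =>
    simp only [pvBodyA, pvV, hc, Bool.false_eq_true, if_false]
    rw [PySem.Dict.getD_modify_self, PySem.Dict.getD_insert_self]

theorem bodyA_getD_ne (f : List (String × Int)) (j : Int) (pd : PySem.Dict String (List Int)) (i k : String) (h : k ≠ i) :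
    (pvBodyA f j pd i).getD k [] = pd.getD k [] := by
  cases hc : pd.contains i with
  | true =>
    simp only [pvBodyA, hc, if_true]
    rw [PySem.Dict.getD_modify_of_ne _ _ _ h]
  | false =>
    simp only [pvBodyA, hc, Bool.false_eq_true, if_false]
    rw [PySem.Dict.getD_modify_of_ne _ _ _ h, PySem.Dict.getD_insert_of_ne _ _ _ h]

theorem foldA_keys (f : List (String × Int)) (j : Int) (l : List String) (pd : PySem.Dict String (List Int)) :
    (l.foldl (pvBodyA f j) pd).keys = PySem.Set.update pd.keys l := by
  induction l generalizing pd with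
  | nil => rfl
  | cons i t ih =>
    rw [List.foldl_cons, ih, PySem.Set.update_cons, bodyA_keys]

theorem loopA_keys (f : List (String × Int)) (j : Int) (pd : PySem.Dict String (List Int)) :
    (pvLoopA f j pd).keys = PySem.Set.update pd.keys (pvKeys f) :=
  foldA_keys f j (pvKeys f) pd

theorem foldA_getD (f : List (String × Int)) (j : Int) (l : List String) (hnd : l.Nodup) (pd : PySem.Dict String (List Int)) (k : String) :
    (l.foldl (pvBodyA f j) pd).getD k [] =
      if k ∈ l then PySem.List.pySetD (pvV pd k) j (PySem.List.pyGetD (pvV pd k) j 0 + pvGet f k)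
      else pd.getD k [] := by
  induction l generalizing pd with
  | nil => simp
  | cons i t ih =>
    have hit : i ∉ t := (List.nodup_cons.mp hnd).1
    have hnt : t.Nodup := (List.nodup_cons.mp hnd).2
    rw [List.foldl_cons, ih hnt]
    by_cases hk : k = i
    · subst hk
      rw [if_neg hit, bodyA_getD_self, if_pos (List.mem_cons_self)]
    · have h1 : (pvBodyA f j pd i).getD k [] = pd.getD k [] := bodyA_getD_ne f j pd i k hk
      have h2 : pvV (pvBodyA f j pd i) k = pvV pd k := by
        unfold pvV
        rw [bodyA_contains, beq_eq_false_iff_ne.mpr hk, Bool.false_or, h1]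
      rw [h1, h2]
      by_cases hm : k ∈ t
      · simp [hm]
      · simp [hm, hk]

theorem loopA_getD (f : List (String × Int)) (j : Int) (pd : PySem.Dict String (List Int)) (k : String) :
    (pvLoopA f j pd).getD k [] =
      if k ∈ pvKeys f then PySem.List.pySetD (pvV pd k) j (PySem.List.pyGetD (pvV pd k) j 0 + pvGet f k)
      else pd.getD k [] := by
  exact foldA_getD f j (pvKeys f) (by unfold pvKeys; exact PySem.List.nodup_dedup _) pd k

theorem pvSlot_0 (x : Int) : PySem.List.pySetD [0, 0, 0, 0, 0, 0] 0 (PySem.List.pyGetD [0, 0, 0, 0, 0, 0] 0 0 + x) = [0 + x, 0, 0, 0, 0, 0] := rfl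
theorem pvSlot_1 (a0 x : Int) : PySem.List.pySetD [a0, 0, 0, 0, 0, 0] 1 (PySem.List.pyGetD [a0, 0, 0, 0, 0, 0] 1 0 + x) = [a0, 0 + x, 0, 0, 0, 0] := rfl
theorem pvSlot_2 (a0 a1 x : Int) : PySem.List.pySetD [a0, a1, 0, 0, 0, 0] 2 (PySem.List.pyGetD [a0, a1, 0, 0, 0, 0] 2 0 + x) = [a0, a1, 0 + x, 0, 0, 0] := rfl
theorem pvSlot_3 (a0 a1 a2 x : Int) : PySem.List.pySetD [a0, a1, a2, 0, 0, 0] 3 (PySem.List.pyGetD [a0, a1, a2, 0, 0, 0] 3 0 + x) = [a0, a1, a2, 0 + x, 0, 0] := rfl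
theorem pvSlot_4 (a0 a1 a2 a3 x : Int) : PySem.List.pySetD [a0, a1, a2, a3, 0, 0] 4 (PySem.List.pyGetD [a0, a1, a2, a3, 0, 0] 4 0 + x) = [a0, a1, a2, a3, 0 + x, 0] := rfl
theorem pvSlot_5 (a0 a1 a2 a3 a4 x : Int) : PySem.List.pySetD [a0, a1, a2, a3, a4, 0] 5 (PySem.List.pyGetD [a0, a1, a2, a3, a4, 0] 5 0 + x) = [a0, a1, a2, a3, a4, 0 + x] := rfl

set_option maxHeartbeats 1600000 in
theorem main_eq (title infobox body category link references : List (String × Int)) :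
    createPageDict title infobox body category link references =
      createPageDict_alt title infobox body category link references := by
  unfold createPageDict createPageDict_alt
  dsimp only []
  simp only [List.flatMap_cons, List.flatMap_nil, List.append_nil, List.map_cons, List.map_nil]
  set P1 := pvLoopA title 0 PySem.Dict.empty with hP1
  set P2 := pvLoopA infobox 1 P1 with hP2
  set P3 := pvLoopA body 2 P2 with hP3
  set P4 := pvLoopA category 3 P3 with hP4
  set P5 := pvLoopA link 4 P4 with hP5
  set P6 := pvLoopA references 5 P5 with hP6
  have k1 : P1.keys = PySem.Set.update [] (pvKeys title) := by rw [hP1, loopA_keys, PySem.Dict.keys_empty]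
  have k2 : P2.keys = PySem.Set.update (P1.keys) (pvKeys infobox) := by rw [hP2, loopA_keys]
  have k3 : P3.keys = PySem.Set.update (P2.keys) (pvKeys body) := by rw [hP3, loopA_keys]
  have k4 : P4.keys = PySem.Set.update (P3.keys) (pvKeys category) := by rw [hP4, loopA_keys]
  have k5 : P5.keys = PySem.Set.update (P4.keys) (pvKeys link) := by rw [hP5, loopA_keys]
  have k6 : P6.keys = PySem.Set.update (P5.keys) (pvKeys references) := by rw [hP6, loopA_keys]
  have m1 : ∀ k, k ∈ P1.keys ↔ k ∈ pvKeys title := by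
    intro k; rw [k1]; rw [PySem.Set.mem_update]; simp
  have m2 : ∀ k, k ∈ P2.keys ↔ k ∈ P1.keys ∨ k ∈ pvKeys infobox := by
    intro k; rw [k2]; exact PySem.Set.mem_update _ _ _
  have m3 : ∀ k, k ∈ P3.keys ↔ k ∈ P2.keys ∨ k ∈ pvKeys body := by
    intro k; rw [k3]; exact PySem.Set.mem_update _ _ _
  have m4 : ∀ k, k ∈ P4.keys ↔ k ∈ P3.keys ∨ k ∈ pvKeys category := by
    intro k; rw [k4]; exact PySem.Set.mem_update _ _ _
  have m5 : ∀ k, k ∈ P5.keys ↔ k ∈ P4.keys ∨ k ∈ pvKeys link := by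
    intro k; rw [k5]; exact PySem.Set.mem_update _ _ _
  have m6 : ∀ k, k ∈ P6.keys ↔ k ∈ P5.keys ∨ k ∈ pvKeys references := by
    intro k; rw [k6]; exact PySem.Set.mem_update _ _ _
  have cmem : ∀ (pd : PySem.Dict String (List Int)) (k : String), pd.contains k = true ↔ k ∈ pd.keys :=
    fun pd k => PySem.Dict.contains_iff_mem_keys pd k
  have v1 : ∀ k ∈ P1.keys, P1.getD k [] = [pvGet title k, 0, 0, 0, 0, 0] := by
    intro k hk
    rw [hP1, loopA_getD, if_pos ((m1 k).mp hk)]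
    unfold pvV
    rw [if_neg (by simp [PySem.Dict.contains_empty])]
    rw [pvSlot_0, zero_add]
  have v2 : ∀ k ∈ P2.keys, P2.getD k [] = [pvGet title k, pvGet infobox k, 0, 0, 0, 0] := by
    intro k hk
    rw [hP2, loopA_getD]
    by_cases hm : k ∈ pvKeys infobox
    · rw [if_pos hm]
      unfold pvV
      by_cases hc : k ∈ P1.keys
      · rw [if_pos ((cmem P1 k).mpr hc), v1 k hc]
        rw [pvSlot_1, zero_add]
      · rw [if_neg (fun h => hc ((cmem P1 k).mp h))]
        have hz0 : pvGet title k = 0 := pvGet_eq_zero _ _ (fun h => hc ((m1 k).mpr h))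
        rw [hz0]
        rw [pvSlot_1, zero_add]
    · rw [if_neg hm]
      have hk1 : k ∈ P1.keys := by
        rcases (m2 k).mp hk with h | h
        · exact h
        · exact absurd h hm
      rw [v1 k hk1, pvGet_eq_zero _ _ hm]
  have v3 : ∀ k ∈ P3.keys, P3.getD k [] = [pvGet title k, pvGet infobox k, pvGet body k, 0, 0, 0] := by
    intro k hk
    rw [hP3, loopA_getD]
    by_cases hm : k ∈ pvKeys body
    · rw [if_pos hm]
      unfold pvV
      by_cases hc : k ∈ P2.keys
      · rw [if_pos ((cmem P2 k).mpr hc), v2 k hc]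
        rw [pvSlot_2, zero_add]
      · rw [if_neg (fun h => hc ((cmem P2 k).mp h))]
        have hz0 : pvGet title k = 0 := pvGet_eq_zero _ _ (fun h => hc ((m2 k).mpr (Or.inl ((m1 k).mpr h))))
        have hz1 : pvGet infobox k = 0 := pvGet_eq_zero _ _ (fun h => hc ((m2 k).mpr (Or.inr h)))
        rw [hz0, hz1]
        rw [pvSlot_2, zero_add]
    · rw [if_neg hm]
      have hk1 : k ∈ P2.keys := by
        rcases (m3 k).mp hk with h | h
        · exact h
        · exact absurd h hm
      rw [v2 k hk1, pvGet_eq_zero _ _ hm]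
  have v4 : ∀ k ∈ P4.keys, P4.getD k [] = [pvGet title k, pvGet infobox k, pvGet body k, pvGet category k, 0, 0] := by
    intro k hk
    rw [hP4, loopA_getD]
    by_cases hm : k ∈ pvKeys category
    · rw [if_pos hm]
      unfold pvV
      by_cases hc : k ∈ P3.keys
      · rw [if_pos ((cmem P3 k).mpr hc), v3 k hc]
        rw [pvSlot_3, zero_add]
      · rw [if_neg (fun h => hc ((cmem P3 k).mp h))]
        have hz0 : pvGet title k = 0 := pvGet_eq_zero _ _ (fun h => hc ((m3 k).mpr (Or.inl ((m2 k).mpr (Or.inl ((m1 k).mpr h))))))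
        have hz1 : pvGet infobox k = 0 := pvGet_eq_zero _ _ (fun h => hc ((m3 k).mpr (Or.inl ((m2 k).mpr (Or.inr h)))))
        have hz2 : pvGet body k = 0 := pvGet_eq_zero _ _ (fun h => hc ((m3 k).mpr (Or.inr h)))
        rw [hz0, hz1, hz2]
        rw [pvSlot_3, zero_add]
    · rw [if_neg hm]
      have hk1 : k ∈ P3.keys := by
        rcases (m4 k).mp hk with h | h
        · exact h
        · exact absurd h hm
      rw [v3 k hk1, pvGet_eq_zero _ _ hm]
  have v5 : ∀ k ∈ P5.keys, P5.getD k [] = [pvGet title k, pvGet infobox k, pvGet body k, pvGet category k, pvGet link k, 0] := by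
    intro k hk
    rw [hP5, loopA_getD]
    by_cases hm : k ∈ pvKeys link
    · rw [if_pos hm]
      unfold pvV
      by_cases hc : k ∈ P4.keys
      · rw [if_pos ((cmem P4 k).mpr hc), v4 k hc]
        rw [pvSlot_4, zero_add]
      · rw [if_neg (fun h => hc ((cmem P4 k).mp h))]
        have hz0 : pvGet title k = 0 := pvGet_eq_zero _ _ (fun h => hc ((m4 k).mpr (Or.inl ((m3 k).mpr (Or.inl ((m2 k).mpr (Or.inl ((m1 k).mpr h))))))))
        have hz1 : pvGet infobox k = 0 := pvGet_eq_zero _ _ (fun h => hc ((m4 k).mpr (Or.inl ((m3 k).mpr (Or.inl ((m2 k).mpr (Or.inr h)))))))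
        have hz2 : pvGet body k = 0 := pvGet_eq_zero _ _ (fun h => hc ((m4 k).mpr (Or.inl ((m3 k).mpr (Or.inr h)))))
        have hz3 : pvGet category k = 0 := pvGet_eq_zero _ _ (fun h => hc ((m4 k).mpr (Or.inr h)))
        rw [hz0, hz1, hz2, hz3]
        rw [pvSlot_4, zero_add]
    · rw [if_neg hm]
      have hk1 : k ∈ P4.keys := by
        rcases (m5 k).mp hk with h | h
        · exact h
        · exact absurd h hm
      rw [v4 k hk1, pvGet_eq_zero _ _ hm]
  have v6 : ∀ k ∈ P6.keys, P6.getD k [] = [pvGet title k, pvGet infobox k, pvGet body k, pvGet category k, pvGet link k, pvGet references k] := by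
    intro k hk
    rw [hP6, loopA_getD]
    by_cases hm : k ∈ pvKeys references
    · rw [if_pos hm]
      unfold pvV
      by_cases hc : k ∈ P5.keys
      · rw [if_pos ((cmem P5 k).mpr hc), v5 k hc]
        rw [pvSlot_5, zero_add]
      · rw [if_neg (fun h => hc ((cmem P5 k).mp h))]
        have hz0 : pvGet title k = 0 := pvGet_eq_zero _ _ (fun h => hc ((m5 k).mpr (Or.inl ((m4 k).mpr (Or.inl ((m3 k).mpr (Or.inl ((m2 k).mpr (Or.inl ((m1 k).mpr h))))))))))
        have hz1 : pvGet infobox k = 0 := pvGet_eq_zero _ _ (fun h => hc ((m5 k).mpr (Or.inl ((m4 k).mpr (Or.inl ((m3 k).mpr (Or.inl ((m2 k).mpr (Or.inr h)))))))))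
        have hz2 : pvGet body k = 0 := pvGet_eq_zero _ _ (fun h => hc ((m5 k).mpr (Or.inl ((m4 k).mpr (Or.inl ((m3 k).mpr (Or.inr h)))))))
        have hz3 : pvGet category k = 0 := pvGet_eq_zero _ _ (fun h => hc ((m5 k).mpr (Or.inl ((m4 k).mpr (Or.inr h)))))
        have hz4 : pvGet link k = 0 := pvGet_eq_zero _ _ (fun h => hc ((m5 k).mpr (Or.inr h)))
        rw [hz0, hz1, hz2, hz3, hz4]
        rw [pvSlot_5, zero_add]
    · rw [if_neg hm]
      have hk1 : k ∈ P5.keys := by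
        rcases (m6 k).mp hk with h | h
        · exact h
        · exact absurd h hm
      rw [v5 k hk1, pvGet_eq_zero _ _ hm]
  have nd : P6.keys.Nodup := by
    rw [k6, k5, k4, k3, k2, k1]
    exact PySem.Set.nodup_update _ _ (PySem.Set.nodup_update _ _ (PySem.Set.nodup_update _ _ (PySem.Set.nodup_update _ _ (PySem.Set.nodup_update _ _ (PySem.Set.nodup_update _ _ List.nodup_nil)))))
  have hkeysB : PySem.List.dedup (pvKeys title ++ (pvKeys infobox ++ (pvKeys body ++ (pvKeys category ++ (pvKeys link ++ pvKeys references))))) = P6.keys := by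
    rw [k6, k5, k4, k3, k2, k1, PySem.Set.update_nil_left]
    rw [PySem.List.dedup_eq_ofList, PySem.Set.ofList_append, PySem.Set.update_append, PySem.Set.update_append, PySem.Set.update_append, PySem.Set.update_append]
  rw [hkeysB, PySem.Dict.items_eq_map_keys P6 nd []]
  exact List.map_congr_left (fun k hk => by rw [v6 k hk])

-- ===== VERDICT (by name: the statement is the Claim_ definition above) =====
theorem createPageDict_spec : Claim_equal_createPageDict := by
  unfold Claim_equal_createPageDict
  intro title infobox body category link references _
  unfold Spec_createPageDict
  exact main_eq title infobox body category link references
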